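-- pv_equiv track=rewrite | github.com/henryh28/coding_practice | misc/royal_names.py | getSortedList
-- ===== SOURCE A (Python) =====
-- def getSortedList(names):
--   from collections import defaultdict
--
--   answer = []
--   name_set = []
--   name_dict = defaultdict(list)
--   roman = ["I", "II", "III", "IV", "V", "VI", "VII", "VIII", "IX", "X", "XI", "XII", "XIII", "XIV", "XV", "XVI", "XVII", "XVIII", "XIX", "XX", "XXI", "XXII", "XXIII", "XXIV", "XXV", "XXVI", "XXVII", "XXVIII", "XXIX", "XXX", "XXXI", "XXXII", "XXXIII", "XXXIV", "XXXV", "XXXVI", "XXXVII", "XXXVIII", "XXXIX", "XL",  "XLI", "XLII", "XLIII", "XLIV", "XLV", "XLVI", "XLVII", "XLVIII", "XLIX", "L"]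
--
--   for name in names:
--     name_split = name.split()
--     name_dict[name_split[0]].append(name_split[1])
--
--   for key, value in name_dict.items():
--     # sorted_num contains sorted tuples of the roman numer portion
--     sorted_num = []
--     for number in value:
--       sorted_num.append((roman.index(number), number))
--
--     sorted_num.sort()
--     name_dict[key] = sorted_num
--     name_set.append(key)
--
--   name_set.sort()
--   for name in name_set:
--     for index in range(len(name_dict[name])):
--       answer.append(name +  " " + name_dict[name][index][1])
--
--   return (answer)
-- ===== SOURCE B (Python) =====
-- def getSortedList(names):
--   roman = ["I", "II", "III", "IV", "V", "VI", "VII", "VIII", "IX", "X", "XI", "XII", "XIII", "XIV", "XV", "XVI", "XVII", "XVIII", "XIX", "XX", "XXI", "XXII", "XXIII", "XXIV", "XXV", "XXVI", "XXVII", "XXVIII", "XXIX", "XXX", "XXXI", "XXXII", "XXXIII", "XXXIV", "XXXV", "XXXVI", "XXXVII", "XXXVIII", "XXXIX", "XL",  "XLI", "XLII", "XLIII", "XLIV", "XLV", "XLVI", "XLVII", "XLVIII", "XLIX", "L"]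
--   ordered = sorted(names, key=lambda n: (n.split()[0], roman.index(n.split()[1])))
--   return [n.split()[0] + " " + n.split()[1] for n in ordered]
-- ===== Notes on version B (the rewrite author's own statement) =====
-- stated objective: simpler
-- what changed: Replaces the defaultdict grouping, per-group tuple sorts and sorted-key merge with one global stable sort of the names under the composite key (first token, roman index), then a direct map to 'first + " " + numeral'.
import Mathlib
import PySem

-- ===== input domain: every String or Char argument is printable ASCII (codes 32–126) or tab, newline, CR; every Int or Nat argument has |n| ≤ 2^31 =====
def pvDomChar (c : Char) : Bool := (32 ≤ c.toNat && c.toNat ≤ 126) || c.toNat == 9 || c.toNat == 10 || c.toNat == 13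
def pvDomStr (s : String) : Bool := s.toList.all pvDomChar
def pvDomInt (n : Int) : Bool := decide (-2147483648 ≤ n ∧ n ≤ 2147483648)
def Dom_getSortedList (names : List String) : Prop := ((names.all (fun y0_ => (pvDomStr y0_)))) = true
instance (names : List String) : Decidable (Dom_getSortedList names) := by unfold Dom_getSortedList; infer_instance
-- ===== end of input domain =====

-- B replaces A's group-in-a-dict / sort-each-group / sort-the-keys / merge structure by ONE global
-- stable sort under the composite key (first token, roman index) followed by a direct map (objective: simpler).

-- ===== PORT A =====
-- the fixed roman-numeral table of the Python source (shared by both ports)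
def romanL : List String := ["I", "II", "III", "IV", "V", "VI", "VII", "VIII", "IX", "X", "XI", "XII", "XIII", "XIV", "XV", "XVI", "XVII", "XVIII", "XIX", "XX", "XXI", "XXII", "XXIII", "XXIV", "XXV", "XXVI", "XXVII", "XXVIII", "XXIX", "XXX", "XXXI", "XXXII", "XXXIII", "XXXIV", "XXXV", "XXXVI", "XXXVII", "XXXVIII", "XXXIX", "XL", "XLI", "XLII", "XLIII", "XLIV", "XLV", "XLVI", "XLVII", "XLVIII", "XLIX", "L"]

-- body of A's second loop: build the (roman.index(number), number) pairs, then sorted_num.sort()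
-- (Python tuple comparison = lexicographic: sorted2 by fst, snd)
def pvSG (value : List String) : List (Int × String) :=
  PySem.List.sorted2
    (value.foldl (fun sorted_num number =>
      sorted_num ++ [((((PySem.List.index? romanL number).getD 0 : Nat) : Int), number)]) [])
    Prod.fst Prod.snd false

def getSortedList (names : List String) : List String :=
  -- first loop: name_dict[name_split[0]].append(name_split[1]) on a defaultdict(list)
  let name_dict := names.foldl (fun d name =>
      d.modify (PySem.List.pyGetD (PySem.Str.split₀ name) 0 "") []
        (· ++ [PySem.List.pyGetD (PySem.Str.split₀ name) 1 ""])) PySem.Dict.empty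
  -- second loop over name_dict.items(): Python overwrites each value in place (keys and their order
  -- unchanged), so the updated dict is rebuilt with the same items order; name_set collects the keys
  let st := name_dict.items.foldl
      (fun (st : PySem.Dict String (List (Int × String)) × List String) kv =>
        (st.1.insert kv.1 (pvSG kv.2), st.2 ++ [kv.1]))
      (PySem.Dict.empty, [])
  -- name_set.sort(); then the nested append loop over range(len(name_dict[name]))
  let name_set := PySem.List.sorted st.2 (fun x => x) false
  name_set.foldl (fun answer name =>
      (PySem.List.pyRange 0 (PySem.List.len (st.1.getD name []))).foldl
        (fun answer index =>
          answer ++ [name ++ " " ++ (PySem.List.pyGetD (st.1.getD name []) index (0, "")).2])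
        answer) []

-- ===== PORT B =====
def getSortedList_alt (names : List String) : List String :=
  let ordered := PySem.List.sorted2 names
      (fun n => PySem.List.pyGetD (PySem.Str.split₀ n) 0 "")
      (fun n => (((PySem.List.index? romanL (PySem.List.pyGetD (PySem.Str.split₀ n) 1 "")).getD 0 : Nat) : Int))
      false
  ordered.map (fun n =>
    PySem.List.pyGetD (PySem.Str.split₀ n) 0 "" ++ " " ++ PySem.List.pyGetD (PySem.Str.split₀ n) 1 "")

-- ===== PRECONDITION & SPEC =====
-- Pre_ excludes exactly the inputs on which Python A raises: a name with fewer than two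
-- whitespace-separated tokens (IndexError) or whose second token is not in the roman table (ValueError).
def Pre_getSortedList (names : List String) : Prop :=
  ∀ n ∈ names, 2 ≤ (PySem.Str.split₀ n).length ∧ PySem.List.pyGetD (PySem.Str.split₀ n) 1 "" ∈ romanL
instance (names : List String) : Decidable (Pre_getSortedList names) := by unfold Pre_getSortedList; infer_instance

def pvWitness_getSortedList : List String := ["Edward II", "Edward I", "Ann XX", "Edward II"]

def Spec_getSortedList (names : List String) (out : List String) : Prop := out = getSortedList_alt names
instance (names : List String) (out : List String) : Decidable (Spec_getSortedList names out) := by unfold Spec_getSortedList; infer_instance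

-- ===== CLAIM (what is proved, stated in full; the proofs are below) =====
def Claim_equal_getSortedList : Prop := ∀ (names : List String), Dom_getSortedList names → Pre_getSortedList names → Spec_getSortedList names (getSortedList names)

-- ===== LEMMAS AND PROOFS =====

-- abbreviations for the three pieces of a name (first token, numeral token, its roman index)
def fA (n : String) : String := PySem.List.pyGetD (PySem.Str.split₀ n) 0 ""
def sA (n : String) : String := PySem.List.pyGetD (PySem.Str.split₀ n) 1 ""
def iA (n : String) : Int := (((PySem.List.index? romanL (sA n)).getD 0 : Nat) : Int)
def kpA (n : String) : String × Int := (fA n, iA n)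
-- rendering of a key back to an output line
def rendP (p : String × Int) : String := p.1 ++ " " ++ PySem.List.pyGetD romanL p.2 ""
-- lexicographic order on keys (= Python tuple comparison)
def Rlex (a b : String × Int) : Prop := toLex a ≤ toLex b

-- sorted2 is sorted under the lexicographic (Lex) key
theorem sorted2_eq_sorted_toLex {α : Type} {κ₁ κ₂ : Type} [LinearOrder κ₁] [LinearOrder κ₂]
    (xs : List α) (k1 : α → κ₁) (k2 : α → κ₂) :
    PySem.List.sorted2 xs k1 k2 false = PySem.List.sorted xs (fun x => toLex (k1 x, k2 x)) false := by
  rw [PySem.List.sorted_eq_foldl_insertBy]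
  simp only [PySem.List.sorted2, Bool.false_eq_true, if_false]
  have hfn : (fun (a b : α) => decide (k1 a < k1 b) || !decide (k1 b < k1 a) && decide (k2 a < k2 b))
      = (fun (a b : α) => decide (toLex (k1 a, k2 a) < toLex (k1 b, k2 b))) := by
    funext a b
    rcases lt_trichotomy (k1 a) (k1 b) with h | h | h
    · simp [Prod.Lex.lt_iff, h, not_lt_of_gt h]
    · simp [Prod.Lex.lt_iff, h]
    · simp [Prod.Lex.lt_iff, not_lt_of_gt h, ne_of_gt h]
      intro hle; exact absurd hle (not_le_of_gt h)
  rw [hfn]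

theorem roman_get_idx {x : String} (hx : x ∈ romanL) :
    PySem.List.pyGetD romanL (((PySem.List.index? romanL x).getD 0 : Nat) : Int) "" = x := by
  obtain ⟨k, hk⟩ := Option.isSome_iff_exists.mp ((PySem.List.index?_isSome_iff romanL x).mpr hx)
  obtain ⟨hlt, hget, -⟩ := PySem.List.getElem_of_index?_eq_some hk
  rw [hk]
  simp only [Option.getD_some, PySem.List.pyGetD_natCast]
  rw [List.getD_eq_getElem _ _ hlt]
  exact hget

-- keys with equal components in both orders of Rlex are equal
theorem Rlex_antisymm : ∀ (a b : String × Int), Rlex a b → Rlex b a → a = b := by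
  intro a b h1 h2
  exact toLex.injective (le_antisymm h1 h2)

-- the partition of a list by its (complete, duplicate-free) key set is a permutation of the list
theorem perm_flatMap_filter {α κ : Type} [BEq κ] [LawfulBEq κ] (ks : List κ) (g : α → κ) :
    ∀ (l : List α), ks.Nodup → (∀ x ∈ l, g x ∈ ks) →
      (ks.flatMap (fun k => l.filter (fun x => g x == k))).Perm l := by
  induction ks with
  | nil =>
    intro l _ hcov
    simp only [List.flatMap_nil]
    cases l with
    | nil => rfl
    | cons x t => exact absurd (hcov x (by simp)) (by simp)
  | cons k ks ih =>
    intro l hnd hcov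
    rw [List.flatMap_cons]
    have hrest : ∀ k' ∈ ks, l.filter (fun x => g x == k')
        = (l.filter (fun x => !(g x == k))).filter (fun x => g x == k') := by
      intro k' hk'
      rw [List.filter_filter]
      apply List.filter_congr
      intro x hx
      have hne : k' ≠ k := by rintro rfl; exact (List.nodup_cons.mp hnd).1 hk'
      by_cases h : g x = k'
      · simp [h, hne]
      · simp [h]
    rw [List.flatMap_congr hrest]
    have ih2 := ih (l.filter (fun x => !(g x == k))) (List.nodup_cons.mp hnd).2 (by
      intro x hx
      have hmem := List.mem_filter.mp hx
      have := hcov x hmem.1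
      simp at hmem
      simpa [hmem.2] using this)
    exact (ih2.append_left _).trans (List.filter_append_perm _ l)

-- B's output is the rendered key sequence of its sort
theorem alt_eq_map_rend (names : List String) (hpre : Pre_getSortedList names) :
    getSortedList_alt names =
      ((PySem.List.sorted names (fun n => toLex (kpA n)) false).map kpA).map rendP := by
  simp only [getSortedList_alt]
  rw [sorted2_eq_sorted_toLex]
  rw [List.map_map]
  apply List.map_congr_left
  intro n hn
  have hmem : n ∈ names := (PySem.List.mem_sorted _ _ _ _).mp hn
  have hsn := (hpre n hmem).2
  simp only [Function.comp, rendP, kpA, fA, iA, sA]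
  rw [roman_get_idx hsn]

-- the dict built by A's first loop
def pvD1 (names : List String) : PySem.Dict String (List String) :=
  names.foldl (fun d name => d.modify (fA name) [] (· ++ [sA name])) PySem.Dict.empty

theorem pvD1_keys (names : List String) :
    (pvD1 names).keys = PySem.List.dedup (names.map fA) := by
  unfold pvD1
  rw [PySem.Dict.keys_foldl_modify_key names (fun n => fA n) []
    (fun _ n => (· ++ [sA n])) PySem.Dict.empty]
  simp [PySem.Set.update_nil_left, PySem.List.dedup_eq_ofList, PySem.Dict.keys_empty]

theorem pvD1_nodup (names : List String) : (pvD1 names).keys.Nodup := by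
  unfold pvD1
  exact PySem.Dict.nodup_keys_foldl_modify_key names (fun n => fA n) []
    (fun _ n => (· ++ [sA n])) PySem.Dict.empty (by simp [PySem.Dict.keys_empty])

theorem pvD1_getD (names : List String) (c : String) :
    (pvD1 names).getD c [] = (names.filter (fun n => fA n == c)).map sA := by
  unfold pvD1
  have h := PySem.Dict.getD_foldl_modify_append (names.map (fun n => (fA n, sA n)))
    PySem.Dict.empty c
  rw [List.foldl_map] at h
  rw [h, List.filter_map, List.map_map]
  simp [PySem.Dict.getD_empty, Function.comp_def]

theorem pvD1_items (names : List String) :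
    (pvD1 names).items = (PySem.List.dedup (names.map fA)).map
      (fun k => (k, (names.filter (fun n => fA n == k)).map sA)) := by
  rw [PySem.Dict.items_eq_map_keys (pvD1 names) (pvD1_nodup names) []]
  rw [pvD1_keys]
  apply List.map_congr_left
  intro k _
  rw [pvD1_getD]

-- the pair-state fold of A's second loop splits into its two components
theorem st_split (l : List (String × List String)) :
    ∀ (d : PySem.Dict String (List (Int × String))) (acc : List String),
      l.foldl (fun st kv => (st.1.insert kv.1 (pvSG kv.2), st.2 ++ [kv.1])) (d, acc)
        = (l.foldl (fun d kv => d.insert kv.1 (pvSG kv.2)) d, acc ++ l.map (·.1)) := by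
  induction l with
  | nil => intro d acc; simp
  | cons kv t ih => intro d acc; simp [List.foldl_cons, ih]

theorem d2_getD (l : List (String × List String)) (hnd : (l.map (·.1)).Nodup)
    {k : String} {v : List String} (hkv : (k, v) ∈ l) :
    (l.foldl (fun d kv => d.insert kv.1 (pvSG kv.2)) PySem.Dict.empty).getD k [] = pvSG v := by
  have hitems := PySem.Dict.items_foldl_insert_fresh l (fun kv => kv.1) (fun kv => pvSG kv.2)
    PySem.Dict.empty (by intro a _; simp [PySem.Dict.contains_empty]) hnd
  have hk : (l.foldl (fun d kv => d.insert kv.1 (pvSG kv.2)) PySem.Dict.empty).keys.Nodup := by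
    have : (l.foldl (fun d kv => d.insert kv.1 (pvSG kv.2)) PySem.Dict.empty).keys
        = l.map (fun kv => kv.1) := by
      simp only [PySem.Dict.keys, hitems]
      simp [PySem.Dict.empty, List.map_map, Function.comp]
    rw [this]; exact hnd
  apply PySem.Dict.getD_of_mem_items _ _ hk
  rw [hitems]
  simp only [PySem.Dict.empty, List.nil_append]
  exact List.mem_map.mpr ⟨(k, v), hkv, rfl⟩

-- A's third loop flattened
theorem loop3 (d2 : PySem.Dict String (List (Int × String))) (ks' : List String) :
    ks'.foldl (fun answer name =>
      (PySem.List.pyRange 0 (PySem.List.len (d2.getD name []))).foldl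
        (fun answer index =>
          answer ++ [name ++ " " ++ (PySem.List.pyGetD (d2.getD name []) index (0, "")).2])
        answer) []
    = ks'.flatMap (fun name => (d2.getD name []).map (fun p => name ++ " " ++ p.2)) := by
  have hbody : (fun (answer : List String) (name : String) =>
      (PySem.List.pyRange 0 (PySem.List.len (d2.getD name []))).foldl
        (fun answer index =>
          answer ++ [name ++ " " ++ (PySem.List.pyGetD (d2.getD name []) index (0, "")).2])
        answer)
      = (fun answer name => answer ++ (d2.getD name []).map (fun p => name ++ " " ++ p.2)) := by
    funext answer name
    rw [PySem.List.foldl_append_singleton_eq_map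
      (fun index => name ++ " " ++ (PySem.List.pyGetD (d2.getD name []) index (0, "")).2)]
    congr 1
    have : (fun (index : Int) => name ++ " " ++ (PySem.List.pyGetD (d2.getD name []) index (0, "")).2)
        = (fun p => name ++ " " ++ p.2) ∘ (fun index => PySem.List.pyGetD (d2.getD name []) index (0, "")) := rfl
    rw [this, ← List.map_map, PySem.List.map_pyGetD_pyRange_zero]
  rw [hbody]
  rw [PySem.List.foldl_append_eq_flatMap]
  simp

-- every element of pvSG v is the (index, numeral) pair of some numeral of v
theorem mem_pvSG {v : List String} {p : Int × String} (hp : p ∈ pvSG v) :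
    ∃ num ∈ v, p = ((((PySem.List.index? romanL num).getD 0 : Nat) : Int), num) := by
  unfold pvSG at hp
  have hp2 := (PySem.List.sorted2_perm _ _ _ _).mem_iff.mp hp
  rw [PySem.List.foldl_append_singleton_eq_map
    (fun number => ((((PySem.List.index? romanL number).getD 0 : Nat) : Int), number))] at hp2
  simp only [List.nil_append, List.mem_map] at hp2
  obtain ⟨num, hnum, heq⟩ := hp2
  exact ⟨num, hnum, heq.symm⟩

-- A's output is the rendered key sequence of its group-sort-merge
def pvKA (names : List String) : List (String × Int) :=
  (PySem.List.sorted (PySem.List.dedup (names.map fA)) (fun x => x) false).flatMap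
    (fun k => (pvSG ((names.filter (fun n => fA n == k)).map sA)).map (fun p => (k, p.1)))

theorem a_eq_map_rend (names : List String) (hpre : Pre_getSortedList names) :
    getSortedList names = (pvKA names).map rendP := by
  simp only [getSortedList]
  rw [show (names.foldl (fun d name =>
      d.modify (PySem.List.pyGetD (PySem.Str.split₀ name) 0 "") []
        (· ++ [PySem.List.pyGetD (PySem.Str.split₀ name) 1 ""])) PySem.Dict.empty) = pvD1 names from rfl]
  rw [st_split]
  have hset : (pvD1 names).items.map (·.1) = (pvD1 names).keys := rfl
  rw [hset, pvD1_keys, List.nil_append]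
  rw [loop3]
  unfold pvKA
  rw [List.map_flatMap]
  apply List.flatMap_congr
  intro k hk
  have hkmem : k ∈ PySem.List.dedup (names.map fA) := (PySem.List.mem_sorted _ _ _ _).mp hk
  have hnd2 : ((pvD1 names).items.map (·.1)).Nodup := by rw [hset]; exact pvD1_nodup names
  have hkv : (k, (names.filter (fun n => fA n == k)).map sA) ∈ (pvD1 names).items := by
    rw [pvD1_items]
    exact List.mem_map.mpr ⟨k, hkmem, rfl⟩
  rw [d2_getD (pvD1 names).items hnd2 hkv]
  rw [List.map_map]
  apply List.map_congr_left
  intro p hp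
  obtain ⟨num, hnum, rfl⟩ := mem_pvSG hp
  obtain ⟨n, hn, rfl⟩ := List.mem_map.mp hnum
  have hroman : sA n ∈ romanL := (hpre n (List.mem_filter.mp hn).1).2
  simp only [Function.comp, rendP]
  rw [roman_get_idx hroman]

theorem pvKA_perm (names : List String) : (pvKA names).Perm (names.map kpA) := by
  have h1 : (pvKA names).Perm ((PySem.List.dedup (names.map fA)).flatMap
      (fun k => (names.filter (fun n => fA n == k)).map kpA)) := by
    unfold pvKA
    apply List.Perm.flatMap (PySem.List.sorted_perm _ _ _)
    intro k _
    have hperm : (pvSG ((names.filter (fun n => fA n == k)).map sA)).Perm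
        (((names.filter (fun n => fA n == k)).map sA).map
          (fun num => ((((PySem.List.index? romanL num).getD 0 : Nat) : Int), num))) := by
      unfold pvSG
      refine (PySem.List.sorted2_perm _ _ _ _).trans ?_
      rw [PySem.List.foldl_append_singleton_eq_map
        (fun number => ((((PySem.List.index? romanL number).getD 0 : Nat) : Int), number))]
      simp
    have hmap : ((((names.filter (fun n => fA n == k)).map sA).map
          (fun num => ((((PySem.List.index? romanL num).getD 0 : Nat) : Int), num))).map
            (fun p => (k, p.1)))
        = (names.filter (fun n => fA n == k)).map kpA := by
      rw [List.map_map, List.map_map]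
      apply List.map_congr_left
      intro n hn
      have hfk : fA n = k := by simpa using (List.mem_filter.mp hn).2
      simp [kpA, iA, Function.comp, hfk]
    rw [← hmap]
    exact hperm.map _
  refine h1.trans ?_
  rw [show ((PySem.List.dedup (names.map fA)).flatMap
      (fun k => (names.filter (fun n => fA n == k)).map kpA))
    = ((PySem.List.dedup (names.map fA)).flatMap
      (fun k => names.filter (fun n => fA n == k))).map kpA from (List.map_flatMap).symm]
  apply List.Perm.map
  apply perm_flatMap_filter _ fA names (PySem.List.nodup_dedup _)
  intro x hx
  exact (PySem.List.mem_dedup _ _).mpr (List.mem_map_of_mem hx)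

theorem pvKA_pairwise (names : List String) : (pvKA names).Pairwise Rlex := by
  unfold pvKA
  rw [List.pairwise_flatMap]
  constructor
  · intro k _
    apply List.pairwise_map.mpr
    have hpw : (pvSG ((names.filter (fun n => fA n == k)).map sA)).Pairwise
        (fun p q => (fun x => toLex (x.1, x.2)) p ≤ (fun x => toLex (x.1, x.2)) q) := by
      unfold pvSG
      rw [sorted2_eq_sorted_toLex]
      exact PySem.List.sorted_pairwise _ _
    apply hpw.imp
    intro p q hpq
    have h1 : p.1 ≤ q.1 := by
      rcases Prod.Lex.le_iff.mp hpq with h | h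
      · exact le_of_lt h
      · exact le_of_eq h.1
    show Rlex (k, p.1) (k, q.1)
    unfold Rlex
    rw [Prod.Lex.le_iff]
    exact Or.inr ⟨rfl, h1⟩
  · have hnodup : (PySem.List.sorted (PySem.List.dedup (names.map fA)) (fun x => x) false).Nodup :=
      (PySem.List.sorted_perm _ _ _).nodup_iff.mpr (PySem.List.nodup_dedup _)
    have hle := PySem.List.sorted_pairwise (PySem.List.dedup (names.map fA)) (fun x => x)
    apply (hle.and hnodup).imp
    intro a b hab x hx y hy
    obtain ⟨p, -, rfl⟩ := List.mem_map.mp hx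
    obtain ⟨q, -, rfl⟩ := List.mem_map.mp hy
    show Rlex (a, p.1) (b, q.1)
    unfold Rlex
    rw [Prod.Lex.le_iff]
    exact Or.inl (lt_of_le_of_ne hab.1 hab.2)

theorem KB_pairwise (names : List String) :
    (((PySem.List.sorted names (fun n => toLex (kpA n)) false).map kpA)).Pairwise Rlex := by
  apply List.pairwise_map.mpr
  exact PySem.List.sorted_pairwise names (fun n => toLex (kpA n))

theorem keyseq_eq (names : List String) :
    pvKA names = (PySem.List.sorted names (fun n => toLex (kpA n)) false).map kpA := by
  apply List.Perm.eq_of_pairwise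
    (fun a b _ _ h1 h2 => Rlex_antisymm a b h1 h2)
    (pvKA_pairwise names) (KB_pairwise names)
  exact (pvKA_perm names).trans
    ((PySem.List.sorted_perm names (fun n => toLex (kpA n)) false).map kpA).symm

-- ===== VERDICT (by name: the statement is the Claim_ definition above) =====
theorem getSortedList_spec : Claim_equal_getSortedList := by
  intro names _ hpre
  show getSortedList names = getSortedList_alt names
  rw [a_eq_map_rend names hpre, alt_eq_map_rend names hpre, keyseq_eq]
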